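-- pv_equiv track=rewrite | github.com/raznodumova/tasks | PYTHON_PRO_TASKS/task_1.py | words_index_map
-- ===== SOURCE A (Python) =====
-- def words_index_map(strings: list[str]) -> dict[str, set[int]]:
--     """words_index_map - возвращаемый словарь
--     enumerate - забирает индекс строки и саму строку из подаваемого списка
--     циклом проходим по строкам и разбиваем их на слова
--     проверяем нет ли такого слова в словаре
--     если нет, то добавляем его в словарь
--     если есть, то добавляем индекс строки в множество"""
--     words_index_map = {}
--     for index, string in enumerate(strings):
--         for word in string.split():
--             if word not in words_index_map:
--                 words_index_map[word] = {index}
--             else: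
--                 words_index_map[word].add(index)
--     return words_index_map
-- ===== SOURCE B (Python) =====
-- def words_index_map(strings: list[str]) -> dict[str, set[int]]:
--     """Flatten once into (word, line_index) pairs, then build the result
--     per word: keys in first-occurrence order (dict.fromkeys), each value
--     gathered in one comprehension over the flat pair list."""
--     pairs = [(w, i) for i, s in enumerate(strings) for w in s.split()]
--     return {w: {i for x, i in pairs if x == w}
--             for w in dict.fromkeys(w for w, _ in pairs)}
-- ===== Notes on version B (the rewrite author's own statement) =====
-- stated objective: alternative
-- what changed: A accumulates a dict of sets on the fly, mutating per word occurrence; B first flattens everything into one (word, line_index) pair list and then builds the result in a dict comprehension over the deduplicated word order, gathering each word's indices in a separate pass over the pair list.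
import Mathlib
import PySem

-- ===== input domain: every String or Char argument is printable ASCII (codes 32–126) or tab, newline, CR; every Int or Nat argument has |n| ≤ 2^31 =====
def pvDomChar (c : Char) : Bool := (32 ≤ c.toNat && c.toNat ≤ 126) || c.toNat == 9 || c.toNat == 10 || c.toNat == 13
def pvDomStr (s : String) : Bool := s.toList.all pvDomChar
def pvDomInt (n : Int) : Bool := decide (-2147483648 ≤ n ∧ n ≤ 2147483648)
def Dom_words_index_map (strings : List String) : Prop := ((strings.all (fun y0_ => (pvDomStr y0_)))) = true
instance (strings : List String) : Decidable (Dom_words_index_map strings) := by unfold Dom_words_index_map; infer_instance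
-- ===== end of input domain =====

-- B replaces A's on-the-fly dict/set accumulation by one flattening pass into (word, line) pairs
-- followed by a per-word gather comprehension (alternative decomposition, same asymptotic cost is not claimed).

-- ===== PORT A =====
def words_index_map (strings : List String) : List (String × List Int) :=
  ((PySem.List.enumerate strings).foldl
    (fun d p =>
      (PySem.Str.split₀ p.2).foldl
        (fun d w =>
          if d.contains w = false then d.insert w [p.1]
          else d.modify w [] (fun s => PySem.Set.add s p.1))
        d)
    PySem.Dict.empty).items

-- ===== PORT B =====
def words_index_map_alt (strings : List String) : List (String × List Int) :=
  let pairs : List (String × Int) := (PySem.List.enumerate strings).flatMap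
    (fun p => (PySem.Str.split₀ p.2).map (fun w => (w, p.1)))
  (PySem.List.dedup (pairs.map Prod.fst)).map
    (fun w => (w, PySem.Set.ofList ((pairs.filter (fun q => q.1 == w)).map Prod.snd)))

-- ===== PRECONDITION & SPEC =====
def Spec_words_index_map (strings : List String) (out : List (String × List Int)) : Prop := out = words_index_map_alt strings
instance (strings : List String) (out : List (String × List Int)) : Decidable (Spec_words_index_map strings out) := by unfold Spec_words_index_map; infer_instance

-- ===== CLAIM (what is proved, stated in full; the proofs are below) =====
def Claim_equal_words_index_map : Prop := ∀ (strings : List String), Dom_words_index_map strings → Spec_words_index_map strings (words_index_map strings)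

-- ===== LEMMAS AND PROOFS =====

-- the flat (word, line-index) pair list both sides traverse
def wimPairs (strings : List String) : List (String × Int) :=
  (PySem.List.enumerate strings).flatMap (fun p => (PySem.Str.split₀ p.2).map (fun w => (w, p.1)))

-- A's per-occurrence dict update, on one flat pair
def wimUpsert (d : PySem.Dict String (List Int)) (q : String × Int) : PySem.Dict String (List Int) :=
  if d.contains q.1 = false then d.insert q.1 [q.2]
  else d.modify q.1 [] (fun s => PySem.Set.add s q.2)

-- the per-word value B computes from a flat pair list
def wimGather (ps : List (String × Int)) (w : String) : List Int :=
  PySem.Set.ofList ((ps.filter (fun q => q.1 == w)).map Prod.snd)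

lemma wim_modify_eq_insert (d : PySem.Dict String (List Int)) (k : String) (f : List Int → List Int) :
    d.modify k [] f = d.insert k (f (d.getD k [])) := PySem.Dict.ext_iff.mpr rfl

lemma wim_eq_foldl_pairs (strings : List String) :
    words_index_map strings = ((wimPairs strings).foldl wimUpsert PySem.Dict.empty).items := by
  unfold words_index_map wimPairs
  rw [List.foldl_flatMap]
  simp only [List.foldl_map]
  rfl

lemma wim_items_foldl (ps : List (String × Int)) :
    (ps.foldl wimUpsert PySem.Dict.empty).items
      = (PySem.List.dedup (ps.map Prod.fst)).map (fun w => (w, wimGather ps w)) := by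
  simp only [PySem.List.dedup_eq_ofList]
  induction ps using List.reverseRecOn with
  | nil => rfl
  | append_singleton ps q ih =>
    rw [List.foldl_append, List.foldl_cons, List.foldl_nil]
    set D := ps.foldl wimUpsert PySem.Dict.empty with hD
    have hkeys : D.keys = PySem.Set.ofList (ps.map Prod.fst) := by
      show D.items.map Prod.fst = _
      rw [ih, List.map_map]
      simp [Function.comp_def]
    have hnodup : D.keys.Nodup := by
      rw [hkeys]; exact PySem.Set.nodup_ofList (xs := ps.map Prod.fst)
    have hmapfst : (ps ++ [q]).map Prod.fst = ps.map Prod.fst ++ [q.1] := by simp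
    have hfilq : ∀ w : String, w ≠ q.1 →
        List.filter (fun r => r.1 == w) [q] = ([] : List (String × Int)) := by
      intro w hne
      have hb : (q.1 == w) = false := by simpa using Ne.symm hne
      simp [List.filter, hb]
    by_cases hw : q.1 ∈ ps.map Prod.fst
    · -- the word was seen before: A modifies in place, both sides keep the key order
      have hc : D.contains q.1 = true := by
        rw [PySem.Dict.contains_eq_decide_mem_keys, hkeys]
        simp [PySem.Set.mem_ofList, hw]
      have hmem : (q.1, wimGather ps q.1) ∈ D.items := by
        rw [ih]
        exact List.mem_map_of_mem (by simpa [PySem.Set.mem_ofList] using hw)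
      have hgetD : D.getD q.1 [] = wimGather ps q.1 :=
        PySem.Dict.getD_of_mem_items _ hmem hnodup []
      rw [wimUpsert, if_neg (by simp [hc]), wim_modify_eq_insert,
          PySem.Dict.items_insert_of_contains _ _ hc, ih, List.map_map,
          hmapfst, PySem.Set.ofList_append_singleton,
          PySem.Set.add_of_mem (s := PySem.Set.ofList (ps.map Prod.fst)) (by simpa [PySem.Set.mem_ofList] using hw)]
      apply List.map_congr_left
      intro w hwmem
      by_cases hqw : w = q.1
      · subst hqw
        simp only [Function.comp_apply, beq_self_eq_true, if_true, hgetD]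
        unfold wimGather
        have hone : List.filter (fun r => r.1 == q.1) [q] = [q] := by simp [List.filter]
        rw [List.filter_append, hone, List.map_append]
        simp [PySem.Set.ofList_append_singleton]
      · have hb : (w == q.1) = false := by simp [hqw]
        simp only [Function.comp_apply, hb, Bool.false_eq_true, if_false]
        unfold wimGather
        rw [List.filter_append, hfilq w hqw, List.append_nil]
    · -- a fresh word: A appends a new key, B's dedup order gains it at the end
      have hc : D.contains q.1 = false := by
        rw [PySem.Dict.contains_eq_decide_mem_keys, hkeys]
        simp [PySem.Set.mem_ofList, hw]
      rw [wimUpsert, if_pos (by simp [hc]), PySem.Dict.items_insert_of_not_contains _ _ hc, ih,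
          hmapfst, PySem.Set.ofList_append_singleton,
          PySem.Set.add_of_not_mem (s := PySem.Set.ofList (ps.map Prod.fst)) (by simpa [PySem.Set.mem_ofList] using hw), List.map_append]
      congr 1
      · apply List.map_congr_left
        intro w hwmem
        have hne : w ≠ q.1 := by
          intro h; subst h
          exact hw (by simpa [PySem.Set.mem_ofList] using hwmem)
        unfold wimGather
        rw [List.filter_append, hfilq w hne, List.append_nil]
      · have hfil : List.filter (fun r => r.1 == q.1) ps = [] := by
          rw [List.filter_eq_nil_iff]
          intro r hr h
          have : r.1 = q.1 := by simpa using h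
          exact hw (this ▸ List.mem_map_of_mem (f := Prod.fst) hr)
        simp [wimGather, List.filter_append, hfil, List.filter, PySem.Set.ofList]

lemma wim_alt_eq (strings : List String) :
    words_index_map_alt strings
      = (PySem.List.dedup ((wimPairs strings).map Prod.fst)).map
          (fun w => (w, wimGather (wimPairs strings) w)) := by
  unfold words_index_map_alt wimPairs wimGather
  rfl

-- ===== VERDICT (by name: the statement is the Claim_ definition above) =====
theorem words_index_map_spec : Claim_equal_words_index_map := by
  intro strings _
  show words_index_map strings = words_index_map_alt strings
  rw [wim_eq_foldl_pairs, wim_items_foldl, wim_alt_eq]
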